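-- pv_equiv track=rewrite | github.com/Epidiah/wordlebot | wordle_bot.py | letter_counts
-- ===== SOURCE A (Python) =====
-- from collections import Counter
--
-- def letter_counts(word_list):
--     l_counter = Counter()
--     l_counter_by_col = [Counter() for n in range(5)]
--     for word in word_list:
--         l_counter.update(word)
--         for i,l in enumerate(word):
--             l_counter_by_col[i][l] += 1
--     return l_counter, l_counter_by_col
-- ===== SOURCE B (Python) =====
-- from collections import Counter
--
-- def letter_counts(word_list):
--     # One flat Counter keyed by (column, letter) pairs, built in a single pass;
--     # the five column counters and the overall counter are then demultiplexed
--     # from it (by first component, and by aggregating counts per letter).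
--     flat = Counter((i, l) for word in word_list for i, l in enumerate(word))
--     l_counter_by_col = [Counter() for n in range(5)]
--     for (i, l), n in flat.items():
--         l_counter_by_col[i][l] = n
--     l_counter = Counter()
--     for (_i, l), n in flat.items():
--         l_counter[l] += n
--     return l_counter, l_counter_by_col
-- ===== Notes on version B (the rewrite author's own statement) =====
-- stated objective: alternative
-- what changed: A's word loop updates the overall counter and the five per-column counters in place as it scans; B builds a single flat Counter keyed by (column, letter) pairs in one pass and then demultiplexes it, filling each column counter from the pairs' first component and aggregating the overall counter from the pairs' letters. (constant-factor speedup: one C-level Counter construction over the pair stream plus per-distinct-pair work replaces per-character Python-level updates of six dicts).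
import Mathlib
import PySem

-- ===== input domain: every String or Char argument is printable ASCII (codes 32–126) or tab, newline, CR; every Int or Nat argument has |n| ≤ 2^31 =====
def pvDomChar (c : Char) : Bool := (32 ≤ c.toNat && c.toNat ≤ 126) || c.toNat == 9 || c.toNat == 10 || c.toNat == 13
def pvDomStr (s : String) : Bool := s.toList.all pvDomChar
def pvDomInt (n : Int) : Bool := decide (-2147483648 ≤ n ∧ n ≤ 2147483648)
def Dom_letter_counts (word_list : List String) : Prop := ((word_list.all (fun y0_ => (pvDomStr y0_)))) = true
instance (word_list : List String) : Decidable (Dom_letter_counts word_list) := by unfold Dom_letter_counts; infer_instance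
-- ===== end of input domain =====

-- B builds one flat Counter keyed by (column, letter) pairs in a single pass and then
-- demultiplexes it into the five column counters and the overall counter, instead of
-- A's word loop updating all six counters in place.

-- ===== PORT A =====

-- Counter[l] += 1  (Counter keys are 1-char strings; missing key counts as 0)
def pvIncr (d : PySem.Dict String Int) (l : Char) : PySem.Dict String Int :=
  d.modify (String.singleton l) 0 (· + 1)

-- body of A's `for word in word_list` loop: `l_counter.update(word)`, then
-- `for i, l in enumerate(word): l_counter_by_col[i][l] += 1`.
-- The list write at index i.toNat is exact: enumerate indices are ≥ 0, and i ≥ 5 is a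
-- Python IndexError, excluded by Pre_letter_counts.
def pvStepA (st : PySem.Dict String Int × List (PySem.Dict String Int)) (word : String) :
    PySem.Dict String Int × List (PySem.Dict String Int) :=
  (word.toList.foldl pvIncr st.1,
   (PySem.List.enumerate word.toList).foldl
     (fun cs il => cs.modify il.1.toNat (fun c => pvIncr c il.2)) st.2)

def letter_counts (word_list : List String) : (List (String × Int)) × (List (List (String × Int))) :=
  let st := word_list.foldl pvStepA
    (PySem.Dict.empty, (List.range 5).map (fun _ => PySem.Dict.empty))
  (st.1.items, st.2.map (fun c => c.items))

-- ===== PORT B =====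

-- `flat = Counter((i, l) for word in word_list for i, l in enumerate(word))`, then
-- `for (i, l), n in flat.items(): l_counter_by_col[i][l] = n` and
-- `for (_i, l), n in flat.items(): l_counter[l] += n`.
-- The list write at index i.toNat is exact: enumerate indices are ≥ 0, and i ≥ 5 is a
-- Python IndexError, excluded by Pre_letter_counts.
def letter_counts_alt (word_list : List String) : (List (String × Int)) × (List (List (String × Int))) :=
  let flat := PySem.Dict.counter (word_list.flatMap (fun w =>
    (PySem.List.enumerate w.toList).map (fun il => (il.1, String.singleton il.2))))
  let cols := flat.items.foldl
    (fun cs kn => cs.modify kn.1.1.toNat (fun c => c.insert kn.1.2 kn.2))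
    ((List.range 5).map (fun _ => PySem.Dict.empty))
  let overall := flat.items.foldl
    (fun t kn => t.modify kn.1.2 0 (· + kn.2)) PySem.Dict.empty
  (overall.items, cols.map (fun c => c.items))

-- ===== PRECONDITION & SPEC =====
-- Both programs raise IndexError as soon as a word has more than 5 characters; exactly those inputs are excluded.
def Pre_letter_counts (word_list : List String) : Prop :=
  ∀ w ∈ word_list, w.toList.length ≤ 5
instance (word_list : List String) : Decidable (Pre_letter_counts word_list) := by
  unfold Pre_letter_counts; infer_instance

def pvWitness_letter_counts : List String := ["crane", "dog", ""]

def Spec_letter_counts (word_list : List String) (out : (List (String × Int)) × (List (List (String × Int)))) : Prop := out = letter_counts_alt word_list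
instance (word_list : List String) (out : (List (String × Int)) × (List (List (String × Int)))) : Decidable (Spec_letter_counts word_list out) := by unfold Spec_letter_counts; infer_instance

-- ===== CLAIM (what is proved, stated in full; the proofs are below) =====
def Claim_equal_letter_counts : Prop := ∀ (word_list : List String), Dom_letter_counts word_list → Pre_letter_counts word_list → Spec_letter_counts word_list (letter_counts word_list)

-- ===== LEMMAS AND PROOFS =====

-- the flattened (index, letter) stream of A's nested loops
def pvStream (wl : List String) : List (Int × Char) :=
  wl.flatMap (fun w => PySem.List.enumerate w.toList)

-- the pairing function B's flat counter counts
def pvPair (il : Int × Char) : Int × String := (il.1, String.singleton il.2)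

-- A's per-word column update, named for the proofs
def pvColStep (cs : List (PySem.Dict String Int)) (word : String) :
    List (PySem.Dict String Int) :=
  (PySem.List.enumerate word.toList).foldl
    (fun cs il => cs.modify il.1.toNat (fun c => pvIncr c il.2)) cs

-- A's pair-state fold, projected on the overall counter: the column updates never touch it
theorem pvFoldA_fst (wl : List String) (st : PySem.Dict String Int × List (PySem.Dict String Int)) :
    (wl.foldl pvStepA st).1 = wl.foldl (fun d w => w.toList.foldl pvIncr d) st.1 := by
  induction wl generalizing st with
  | nil => rfl
  | cons w rest ih => simpa [pvStepA] using ih (pvStepA st w)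

-- A's pair-state fold, projected on the column counters
theorem pvFoldA_snd (wl : List String) (st : PySem.Dict String Int × List (PySem.Dict String Int)) :
    (wl.foldl pvStepA st).2 = wl.foldl pvColStep st.2 := by
  induction wl generalizing st with
  | nil => rfl
  | cons w rest ih => simpa [pvStepA, pvColStep] using ih (pvStepA st w)

-- A's in-pass overall accumulator is the Counter of the flattened characters
theorem pvOverall_eq (wl : List String) :
    wl.foldl (fun d w => w.toList.foldl pvIncr d) PySem.Dict.empty =
      PySem.Dict.counter (wl.flatMap (fun w => w.toList.map String.singleton)) := by
  rw [PySem.Dict.counter_eq_foldl, List.foldl_flatMap]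
  congr 1
  funext d w
  rw [List.foldl_map]
  rfl

-- A's word-by-word column fold is the fold over the flattened (index, letter) stream
theorem pvColFold (wl : List String) (cs : List (PySem.Dict String Int)) :
    wl.foldl pvColStep cs =
      (pvStream wl).foldl
        (fun cs il => cs.modify il.1.toNat (fun c => pvIncr c il.2)) cs := by
  rw [pvStream, List.foldl_flatMap]
  rfl

-- a fold of per-index list updates keeps the list length
theorem pvFoldLen {α : Type} (ps : List α) (ix : α → Nat)
    (g : α → PySem.Dict String Int → PySem.Dict String Int)
    (cs : List (PySem.Dict String Int)) :
    (ps.foldl (fun cs p => cs.modify (ix p) (g p)) cs).length = cs.length := by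
  induction ps generalizing cs with
  | nil => rfl
  | cons p t ih => simp [ih, List.length_modify]

-- projecting such a fold on one index j: only the elements routed to j matter
theorem pvProj {α : Type} (ps : List α) (ix : α → Nat)
    (g : α → PySem.Dict String Int → PySem.Dict String Int)
    (cs : List (PySem.Dict String Int)) (j : Nat) (hj : j < cs.length) :
    (ps.foldl (fun cs p => cs.modify (ix p) (g p)) cs)[j]'(by
        rw [pvFoldLen]; exact hj) =
      (ps.filter (fun p => ix p == j)).foldl (fun c p => g p c) cs[j] := by
  induction ps generalizing cs with
  | nil => rfl
  | cons p t ih =>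
    simp only [List.foldl_cons, List.filter_cons]
    by_cases hp : ix p = j
    · rw [ih (cs.modify (ix p) (g p)) (by simpa [List.length_modify])]
      simp [hp]
    · rw [ih (cs.modify (ix p) (g p)) (by simpa [List.length_modify])]
      simp [hp]

-- first-occurrence dedup commutes with filter
theorem pvOfListFilter {α : Type} [BEq α] [LawfulBEq α] (xs : List α) (p : α → Bool) :
    PySem.Set.ofList (xs.filter p) = (PySem.Set.ofList xs).filter p := by
  induction xs using List.reverseRecOn with
  | nil => rfl
  | append_singleton xs x ih =>
    rw [List.filter_append, PySem.Set.ofList_append_singleton]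
    by_cases hx : x ∈ xs
    · rw [PySem.Set.add_of_mem (by simpa [PySem.Set.mem_ofList] using hx)]
      by_cases hp : p x
      · have h1 : [x].filter p = [x] := by simp [hp]
        rw [h1, PySem.Set.ofList_append_singleton, ih,
          PySem.Set.add_of_mem (by simp [List.mem_filter, PySem.Set.mem_ofList, hx, hp])]
      · have h1 : [x].filter p = [] := by simp [hp]
        rw [h1, List.append_nil, ih]
    · rw [PySem.Set.add_of_not_mem (by simpa [PySem.Set.mem_ofList] using hx),
        List.filter_append]
      by_cases hp : p x
      · have h1 : [x].filter p = [x] := by simp [hp]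
        rw [h1, PySem.Set.ofList_append_singleton, ih,
          PySem.Set.add_of_not_mem (by simp [List.mem_filter, PySem.Set.mem_ofList, hx])]
      · have h1 : [x].filter p = [] := by simp [hp]
        rw [h1, List.append_nil, List.append_nil, ih]

-- first-occurrence dedup of a mapped list: pre-deduplicating does not change it
theorem pvOfListMap {α β : Type} [BEq α] [LawfulBEq α] [BEq β] [LawfulBEq β]
    (xs : List α) (g : α → β) :
    PySem.Set.ofList ((PySem.Set.ofList xs).map g) = PySem.Set.ofList (xs.map g) := by
  induction xs using List.reverseRecOn with
  | nil => rfl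
  | append_singleton xs x ih =>
    rw [PySem.Set.ofList_append_singleton]
    by_cases hx : x ∈ xs
    · rw [PySem.Set.add_of_mem (by simpa [PySem.Set.mem_ofList] using hx), ih,
        List.map_append]
      simp only [List.map_cons, List.map_nil]
      rw [PySem.Set.ofList_append_singleton,
        PySem.Set.add_of_mem (by
          simp only [PySem.Set.mem_ofList]
          exact List.mem_map_of_mem hx)]
    · rw [PySem.Set.add_of_not_mem (by simpa [PySem.Set.mem_ofList] using hx),
        List.map_append, List.map_append]
      simp only [List.map_cons, List.map_nil]
      rw [PySem.Set.ofList_append_singleton, PySem.Set.ofList_append_singleton, ih]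

-- counting through an injective-on-the-list map
theorem pvCountMapInjOn {α β : Type} [BEq α] [LawfulBEq α] [BEq β] [LawfulBEq β]
    (l : List α) (g : α → β) (a : α) (h : ∀ b ∈ l, g b = g a → b = a) :
    (l.map g).count (g a) = l.count a := by
  induction l with
  | nil => rfl
  | cons b t ih =>
    have ht : ∀ c ∈ t, g c = g a → c = a := fun c hc => h c (List.mem_cons_of_mem _ hc)
    rw [List.map_cons, List.count_cons, List.count_cons, ih ht]
    by_cases hba : g b = g a
    · have hb : b = a := h b List.mem_cons_self hba
      simp [hb]
    · have hb : b ≠ a := fun e => hba (by rw [e])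
      simp [hba, hb]

-- value of a modify-and-add fold at one key
theorem pvGetDFold (l : List ((Int × String) × Int)) (d : PySem.Dict String Int) (c : String) :
    (l.foldl (fun t kn => t.modify kn.1.2 0 (· + kn.2)) d).getD c 0 =
      d.getD c 0 + ((l.filter (fun kn => kn.1.2 == c)).map (·.2)).sum := by
  induction l generalizing d with
  | nil => simp
  | cons kn t ih =>
    simp only [List.foldl_cons, List.filter_cons]
    rw [ih]
    by_cases hc : kn.1.2 = c
    · simp [hc]
      ring
    · simp [hc, PySem.Dict.getD_modify, Ne.symm hc]

-- summing the multiplicities of the distinct elements selected by p counts p's elements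
theorem pvSumCount {α : Type} [DecidableEq α] [BEq α] [LawfulBEq α]
    (qs : List α) (p : α → Bool) :
    (((PySem.Set.ofList qs).filter p).map (fun k => (qs.count k : Int))).sum =
      (qs.countP p : Int) := by
  have hperm : ((PySem.Set.ofList qs).filter p).Perm (qs.dedup.filter p) := by
    apply (List.perm_ext_iff_of_nodup
      ((PySem.Set.nodup_ofList qs).filter p) (qs.nodup_dedup.filter p)).2
    intro k
    simp [List.mem_filter, PySem.Set.mem_ofList, List.mem_dedup]
  have hnat : (((PySem.Set.ofList qs).filter p).map (fun k => qs.count k)).sum =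
      qs.countP p := by
    rw [(hperm.map _).sum_eq]
    have hcount : ∀ k : α, qs.count k = @List.count α instBEqOfDecidableEq k qs := by
      intro k
      rw [@List.count_eq_countP α _ k qs, @List.count_eq_countP α instBEqOfDecidableEq k qs]
      exact List.countP_congr (by intro a _; simp)
    rw [List.map_congr_left (fun k _ => hcount k)]
    exact List.sum_map_count_dedup_filter_eq_countP p qs
  have hcast : (((PySem.Set.ofList qs).filter p).map (fun k => (qs.count k : Int))).sum =
      (((((PySem.Set.ofList qs).filter p).map (fun k => qs.count k)).sum : Nat) : Int) := by
    rw [Nat.cast_list_sum, List.map_map]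
    rfl
  rw [hcast, hnat]

-- ===== facts about the concrete stream =====

-- every index produced by enumerate is nonnegative
theorem pvStreamNonneg (wl : List String) : ∀ p ∈ pvStream wl, 0 ≤ p.1 := by
  intro p hp
  rw [pvStream, List.mem_flatMap] at hp
  obtain ⟨w, _, hw⟩ := hp
  rw [PySem.List.mem_enumerate_iff] at hw
  obtain ⟨k, _, rfl⟩ := hw
  simp

-- B's flat key list is the paired stream
theorem pvQsEq (wl : List String) :
    wl.flatMap (fun w =>
        (PySem.List.enumerate w.toList).map (fun il => (il.1, String.singleton il.2))) =
      (pvStream wl).map pvPair := by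
  rw [pvStream, List.map_flatMap]
  rfl

-- A's flattened letter stream is the second components of the paired stream
theorem pvLettersEq (wl : List String) :
    wl.flatMap (fun w => w.toList.map String.singleton) =
      ((pvStream wl).map pvPair).map (·.2) := by
  rw [pvStream, List.map_map, List.map_flatMap]
  congr 1
  funext w
  have h1 : ((fun x : Int × String => x.2) ∘ pvPair) =
      (String.singleton ∘ (fun il : Int × Char => il.2)) := rfl
  rw [h1, ← List.map_map, PySem.List.map_snd_enumerate]

-- ===== the overall counter: demultiplexing the flat counter by letter =====

theorem pvOverallFlat (wl : List String) :
    ((PySem.Dict.counter ((pvStream wl).map pvPair)).items.foldl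
        (fun t kn => t.modify kn.1.2 0 (· + kn.2)) PySem.Dict.empty) =
      PySem.Dict.counter (((pvStream wl).map pvPair).map (·.2)) := by
  set qs := (pvStream wl).map pvPair with hqs
  have hndL : ((PySem.Dict.counter qs).items.foldl
      (fun t kn => t.modify kn.1.2 0 (· + kn.2)) PySem.Dict.empty).keys.Nodup := by
    apply PySem.Dict.nodup_keys_foldl_modify_key
    simp [PySem.Dict.keys_empty]
  have hndR : (PySem.Dict.counter (qs.map (·.2))).keys.Nodup :=
    PySem.Dict.nodup_keys_counter _
  apply PySem.Dict.ext
  rw [PySem.Dict.items_eq_map_keys _ hndL (0 : Int),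
    PySem.Dict.items_eq_map_keys _ hndR (0 : Int)]
  have hkeys : ((PySem.Dict.counter qs).items.foldl
      (fun t kn => t.modify kn.1.2 0 (· + kn.2)) PySem.Dict.empty).keys =
      (PySem.Dict.counter (qs.map (·.2))).keys := by
    rw [PySem.Dict.keys_foldl_modify_key, PySem.Dict.keys_counter, PySem.Dict.keys_empty,
      PySem.Set.update_nil_left, PySem.Dict.items_counter, List.map_map]
    exact pvOfListMap qs (·.2)
  rw [hkeys]
  apply List.map_congr_left
  intro c _
  rw [pvGetDFold, PySem.Dict.getD_counter, PySem.Dict.items_counter]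
  rw [List.filter_map, List.map_map]
  have : ((fun kn : (Int × String) × Int => kn.1.2 == c) ∘
      (fun k => (k, (qs.count k : Int)))) = (fun k => k.2 == c) := rfl
  rw [this]
  have : ((fun kn : (Int × String) × Int => kn.2) ∘
      (fun k => (k, (qs.count k : Int)))) = (fun k => (qs.count k : Int)) := rfl
  rw [this, pvSumCount qs (fun k => k.2 == c)]
  have hL : qs.countP (fun k => k.2 == c) =
      (pvStream wl).countP (fun p => String.singleton p.2 == c) := by
    rw [hqs, List.countP_map]
    rfl
  have hR : (qs.map (·.2)).count c =
      (pvStream wl).countP (fun p => String.singleton p.2 == c) := by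
    rw [List.count_eq_countP, List.countP_map, hqs, List.countP_map]
    rfl
  rw [hL, hR, PySem.Dict.getD_empty, zero_add]

-- ===== the column counters: demultiplexing the flat counter by column =====

-- the j-th column of A's fold is the Counter of the letters at column j
theorem pvColA (wl : List String) (j : Nat) (hj : j < 5) :
    ((pvStream wl).foldl
        (fun cs il => cs.modify il.1.toNat (fun c => pvIncr c il.2))
        ((List.range 5).map (fun _ => PySem.Dict.empty)))[j]'(by
          rw [pvFoldLen]; simpa using hj) =
      PySem.Dict.counter
        (((pvStream wl).filter (fun p => p.1.toNat == j)).map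
          (fun p => String.singleton p.2)) := by
  have hj' : j < ((List.range 5).map
      (fun _ => (PySem.Dict.empty : PySem.Dict String Int))).length := by simpa using hj
  rw [pvProj _ _ _ _ j hj']
  have hinit : ((List.range 5).map
      (fun _ => (PySem.Dict.empty : PySem.Dict String Int)))[j]'hj' = PySem.Dict.empty := by
    simp
    interval_cases j <;> rfl
  rw [hinit, PySem.Dict.counter_eq_foldl, List.foldl_map]
  rfl

-- the j-th column of B's fold equals that Counter as well
theorem pvColB (wl : List String) (j : Nat) :
    (((PySem.Dict.counter ((pvStream wl).map pvPair)).items.filter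
        (fun kn => kn.1.1.toNat == j)).foldl
      (fun c kn => c.insert kn.1.2 kn.2) PySem.Dict.empty) =
      PySem.Dict.counter
        (((pvStream wl).filter (fun p => p.1.toNat == j)).map
          (fun p => String.singleton p.2)) := by
  set qs := (pvStream wl).map pvPair with hqs
  set sj := (pvStream wl).filter (fun p => p.1.toNat == j) with hsj
  -- every stream element at column j has first component exactly (j : Int)
  have hfst : ∀ p ∈ sj, p.1 = (j : Int) := by
    intro p hp
    rw [hsj, List.mem_filter] at hp
    have h0 := pvStreamNonneg wl p hp.1
    have := hp.2
    simp at this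
    omega
  -- the filtered flat items are the paired distinct column-j elements
  have hfi : (PySem.Dict.counter qs).items.filter (fun kn => kn.1.1.toNat == j) =
      (PySem.Set.ofList (sj.map pvPair)).map (fun k => (k, (qs.count k : Int))) := by
    rw [PySem.Dict.items_counter, List.filter_map]
    have : ((fun kn : (Int × String) × Int => kn.1.1.toNat == j) ∘
        (fun k => (k, (qs.count k : Int)))) = (fun k : Int × String => k.1.toNat == j) := rfl
    rw [this, ← pvOfListFilter]
    congr 2
    rw [hqs, hsj, List.filter_map]
    rfl
  rw [hfi]
  -- the letter keys of those entries are distinct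
  have hinj : ∀ a ∈ PySem.Set.ofList (sj.map pvPair), ∀ b ∈ PySem.Set.ofList (sj.map pvPair),
      a.2 = b.2 → a = b := by
    intro a ha b hb hab
    rw [PySem.Set.mem_ofList, List.mem_map] at ha hb
    obtain ⟨pa, hpa, rfl⟩ := ha
    obtain ⟨pb, hpb, rfl⟩ := hb
    have : pa.1 = pb.1 := by rw [hfst pa hpa, hfst pb hpb]
    exact congrArg pvPair (Prod.ext this (by
      have := hab
      simpa [pvPair, String.singleton] using this))
  have hndk : ((PySem.Set.ofList (sj.map pvPair)).map
      (fun k => (k, (qs.count k : Int))) |>.map (fun kn => kn.1.2)).Nodup := by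
    rw [List.map_map]
    have : ((fun kn : (Int × String) × Int => kn.1.2) ∘
        (fun k => (k, (qs.count k : Int)))) = (fun k : Int × String => k.2) := rfl
    rw [this]
    exact List.Nodup.map_on (fun a ha b hb h => hinj a ha b hb h) (PySem.Set.nodup_ofList _)
  -- the insert fold over fresh distinct keys just lists its entries
  have hitems : (((PySem.Set.ofList (sj.map pvPair)).map
        (fun k => (k, (qs.count k : Int)))).foldl
      (fun c kn => c.insert kn.1.2 kn.2) PySem.Dict.empty).items =
      ((PySem.Set.ofList (sj.map pvPair)).map
        (fun k => (k, (qs.count k : Int)))).map (fun kn => (kn.1.2, kn.2)) := by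
    rw [show (fun (c : PySem.Dict String Int) (kn : (Int × String) × Int) =>
        c.insert kn.1.2 kn.2) = (fun c kn => c.insert ((fun kn : (Int × String) × Int =>
        kn.1.2) kn) ((fun kn : (Int × String) × Int => kn.2) kn)) from rfl]
    rw [PySem.Dict.items_foldl_insert_fresh _ _ _ _
      (fun a _ => PySem.Dict.contains_empty _) hndk]
    simp
    rfl
  apply PySem.Dict.ext
  rw [hitems, PySem.Dict.items_counter, List.map_map]
  -- identify the distinct letters with the distinct pairs
  have hkeys : (PySem.Set.ofList (sj.map pvPair)).map (fun k => k.2) =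
      PySem.Set.ofList (sj.map (fun p => String.singleton p.2)) := by
    have h1 : sj.map (fun p => String.singleton p.2) = (sj.map pvPair).map (·.2) := by
      rw [List.map_map]; rfl
    rw [h1, ← pvOfListMap (sj.map pvPair) (·.2)]
    have hnd : ((PySem.Set.ofList (sj.map pvPair)).map (fun k : Int × String => k.2)).Nodup :=
      List.Nodup.map_on (fun a ha b hb h => hinj a ha b hb h) (PySem.Set.nodup_ofList _)
    exact (PySem.Set.ofList_eq_self_of_nodup _ hnd).symm
  rw [← hkeys, List.map_map]
  apply List.map_congr_left
  intro k hk
  simp only [Function.comp]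
  congr 1
  -- multiplicities: count of the pair in qs = count of its letter at column j
  rw [PySem.Set.mem_ofList, List.mem_map] at hk
  obtain ⟨p, hp, rfl⟩ := hk
  have hc1 : qs.count (pvPair p) = (pvStream wl).count p := by
    rw [hqs]
    apply pvCountMapInjOn (pvStream wl) pvPair p
    intro b _ hb
    rw [pvPair, pvPair, Prod.mk.injEq] at hb
    exact Prod.ext hb.1 (by
      have := congrArg (fun s : String => s.toList) hb.2
      simpa [String.singleton] using this)
  have hc2 : (sj.map (fun p => String.singleton p.2)).count (String.singleton p.2) =
      sj.count p := by
    apply pvCountMapInjOn sj (fun q : Int × Char => String.singleton q.2) p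
    intro b hb h
    have : b.1 = p.1 := by rw [hfst b hb, hfst p hp]
    exact Prod.ext this (by
      have := congrArg (fun s : String => s.toList) h
      simpa [String.singleton] using this)
  have hred : (pvPair p).2 = String.singleton p.2 := rfl
  rw [hc1, hred, hc2, hsj]
  rw [List.count_filter]
  have : (fun p_1 : Int × Char => p_1.1.toNat == j) p = true := by
    rw [hsj, List.mem_filter] at hp
    exact hp.2
  simp [this]

-- the j-th column of B's fold (before projecting) is that Counter
theorem pvColBList (wl : List String) (j : Nat) (hj : j < 5) :
    (((PySem.Dict.counter ((pvStream wl).map pvPair)).items.foldl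
        (fun cs kn => cs.modify kn.1.1.toNat (fun c => c.insert kn.1.2 kn.2))
        ((List.range 5).map (fun _ => PySem.Dict.empty)))[j]'(by
          rw [pvFoldLen]; simpa using hj)) =
      PySem.Dict.counter
        (((pvStream wl).filter (fun p => p.1.toNat == j)).map
          (fun p => String.singleton p.2)) := by
  have hj' : j < ((List.range 5).map
      (fun _ => (PySem.Dict.empty : PySem.Dict String Int))).length := by simpa using hj
  rw [pvProj _ _ _ _ j hj']
  have hinit : ((List.range 5).map
      (fun _ => (PySem.Dict.empty : PySem.Dict String Int)))[j]'hj' = PySem.Dict.empty := by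
    simp
    interval_cases j <;> rfl
  rw [hinit]
  exact pvColB wl j

-- the two ports agree
theorem pvPorts_eq (wl : List String) : letter_counts wl = letter_counts_alt wl := by
  simp only [letter_counts, letter_counts_alt]
  rw [pvQsEq]
  have h1 : (wl.foldl pvStepA
        (PySem.Dict.empty, (List.range 5).map (fun _ => PySem.Dict.empty))).1
      = (PySem.Dict.counter ((pvStream wl).map pvPair)).items.foldl
          (fun t kn => t.modify kn.1.2 0 (· + kn.2)) PySem.Dict.empty := by
    rw [pvFoldA_fst, pvOverall_eq, pvLettersEq, pvOverallFlat]
  have h2 : (wl.foldl pvStepA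
        (PySem.Dict.empty, (List.range 5).map (fun _ => PySem.Dict.empty))).2
      = (PySem.Dict.counter ((pvStream wl).map pvPair)).items.foldl
          (fun cs kn => cs.modify kn.1.1.toNat (fun c => c.insert kn.1.2 kn.2))
          ((List.range 5).map (fun _ => PySem.Dict.empty)) := by
    rw [pvFoldA_snd, pvColFold]
    apply List.ext_getElem
    · rw [pvFoldLen, pvFoldLen]
    · intro j hA hB
      have hj : j < 5 := by
        rw [pvFoldLen] at hA
        simpa using hA
      exact (pvColA wl j hj).trans (pvColBList wl j hj).symm
  rw [h1, h2]

-- ===== VERDICT (by name: the statement is the Claim_ definition above) =====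
theorem letter_counts_spec : Claim_equal_letter_counts := by
  intro wl _ _
  unfold Spec_letter_counts
  exact pvPorts_eq wl
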